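-- pv_equiv track=rewrite | github.com/jay0905/Algorithms | 종이접기.py | solution
-- ===== SOURCE A (Python) =====
-- from collections import deque
--
-- def solution(n):
--     dp = [[], [0], [0, 0, 1], [0, 0, 1, 0, 0, 1, 1]]
--
--     if n <= 3:
--         return dp[n]
--
--     for i in range(4, n + 1):
--         paper = []
--         previous = deque(dp[i - 1])
--
--         for j in range(len(previous)):
--             if j % 2 == 0:
--                 paper.append(0)
--             else:
--                 paper.append(1)
--             paper.append(previous.popleft())
--         paper.append(1)
--
--         dp.append(paper)
--
--     return dp[-1]
-- ===== SOURCE B (Python) =====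
-- def solution(n):
--     dp = [[], [0], [0, 0, 1], [0, 0, 1, 0, 0, 1, 1]]
--
--     if n <= 3:
--         return dp[n]
--
--     # Each position k (1-based) is computed independently: strip the factors
--     # of 2 from k; the fold direction is 0 iff the remaining odd part is 1 mod 4.
--     res = []
--     for k in range(1, 2 ** n):
--         m = k
--         while m % 2 == 0:
--             m //= 2
--         res.append(0 if m % 4 == 1 else 1)
--     return res
-- ===== Notes on version B (the rewrite author's own statement) =====
-- stated objective: alternative
-- what changed: B computes each element of the order-n fold sequence directly from its 1-based index via the 2-adic odd part (0 iff odd part is 1 mod 4), instead of A's level-by-level rebuild that interleaves new creases into the previous level stored in a dp table.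
import Mathlib
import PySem

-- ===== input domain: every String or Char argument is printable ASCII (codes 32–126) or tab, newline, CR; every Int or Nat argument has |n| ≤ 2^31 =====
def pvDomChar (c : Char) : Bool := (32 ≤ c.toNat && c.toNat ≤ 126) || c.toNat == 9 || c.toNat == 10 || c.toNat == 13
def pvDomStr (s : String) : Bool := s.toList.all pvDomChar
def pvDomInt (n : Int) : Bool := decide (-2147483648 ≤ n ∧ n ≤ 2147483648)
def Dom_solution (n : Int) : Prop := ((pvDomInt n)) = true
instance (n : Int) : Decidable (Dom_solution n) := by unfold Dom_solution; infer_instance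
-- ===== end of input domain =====

-- B builds each element directly from its index via the 2-adic odd part instead of
-- A's level-by-level interleaving rebuild; equivalence is about the return value.

-- ===== PORT A =====
-- inner loop: for j in range(len(previous)): append 0/1 by parity of j, then previous.popleft(); finally append 1
def pvStepA (previous : List Int) : List Int :=
  ((PySem.List.enumerate previous).foldl
    (fun paper jx => (paper ++ [if jx.1 % 2 == 0 then (0 : Int) else 1]) ++ [jx.2]) []) ++ [1]

def solution (n : Int) : List Int :=
  let dp : List (List Int) := [[], [0], [0, 0, 1], [0, 0, 1, 0, 0, 1, 1]]
  if n ≤ 3 then (PySem.List.pyGet? dp n).getD []   -- Pre_ excludes the IndexError region n ≤ -5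
  else
    let dp2 := (PySem.List.pyRange 4 (n + 1) 1).foldl
      (fun dp i => dp ++ [pvStepA ((PySem.List.pyGet? dp (i - 1)).getD [])]) dp
    (PySem.List.pyGet? dp2 (-1)).getD []

-- ===== PORT B =====
-- 'm = k; while m % 2 == 0: m //= 2' on the positive k drawn from range(1, 2**n)
def pvOddPart : Nat → Nat
  | 0 => 0
  | m + 1 => if (m + 1) % 2 == 0 then pvOddPart ((m + 1) / 2) else m + 1
decreasing_by omega

def solution_alt (n : Int) : List Int :=
  let dp : List (List Int) := [[], [0], [0, 0, 1], [0, 0, 1, 0, 0, 1, 1]]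
  if n ≤ 3 then (PySem.List.pyGet? dp n).getD []
  else
    -- here 4 ≤ n, so 2**n is (2 : Int) ^ n.toNat and every k in the range is positive
    (PySem.List.pyRange 1 ((2 : Int) ^ n.toNat) 1).map
      (fun k => if pvOddPart k.toNat % 4 == 1 then (0 : Int) else 1)

-- ===== PRECONDITION & SPEC =====
-- Pre_ excludes only n ≤ -5, where A's 'dp[n]' raises IndexError (and B raises too).
def Pre_solution (n : Int) : Prop := -4 ≤ n
instance (n : Int) : Decidable (Pre_solution n) := by unfold Pre_solution; infer_instance
def pvWitness_solution : Int := (5)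

def Spec_solution (n : Int) (out : List Int) : Prop := out = solution_alt n
instance (n : Int) (out : List Int) : Decidable (Spec_solution n out) := by unfold Spec_solution; infer_instance

-- ===== CLAIM (what is proved, stated in full; the proofs are below) =====
def Claim_equal_solution : Prop := ∀ (n : Int), Dom_solution n → Pre_solution n → Spec_solution n (solution n)

-- ===== LEMMAS AND PROOFS =====

def pvF (k : Nat) : Int := if pvOddPart k % 4 == 1 then 0 else 1

def pvFm (m : Nat) : List Int := (List.range' 1 (2 ^ m - 1)).map pvF

theorem pvOddPart_odd (k : Nat) (h : k % 2 = 1) : pvOddPart k = k := by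
  cases k with
  | zero => simp at h
  | succ m =>
    rw [pvOddPart]
    have h2 : ((m + 1) % 2 == 0) = false := by simp; omega
    simp [h2]

theorem pvOddPart_two_mul (k : Nat) : pvOddPart (2 * k) = pvOddPart k := by
  cases k with
  | zero => rfl
  | succ m =>
    have h : 2 * (m + 1) = (2 * m + 1) + 1 := by ring
    rw [h, pvOddPart]
    have h2 : ((2 * m + 1 + 1) % 2 == 0) = true := by rw [beq_iff_eq]; omega
    simp only [h2, if_true]
    congr 1
    omega

theorem pvInterleave (N : Nat) :
    (PySem.List.enumerate ((List.range' 1 N).map pvF)).foldl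
      (fun paper jx => (paper ++ [if jx.1 % 2 == 0 then (0 : Int) else 1]) ++ [jx.2]) []
    = (List.range' 1 (2 * N)).map pvF := by
  induction N with
  | zero => rfl
  | succ N ih =>
    have hr : List.range' 1 (N + 1) = List.range' 1 N ++ [1 + 1 * N] := List.range'_concat
    have hlen : ((List.range' 1 N).map pvF).length = N := by simp
    rw [hr, List.map_append, PySem.List.enumerate_append, List.foldl_append, ih, hlen]
    rw [show 2 * (N + 1) = (2 * N + 1) + 1 by ring, List.range'_concat,
        show (2 * N + 1) = (2 * N) + 1 by ring, List.range'_concat]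
    simp only [Nat.one_mul, List.map_append, PySem.List.enumerate_cons,
      PySem.List.enumerate_nil, List.foldl_cons, List.foldl_nil, List.map_cons, List.map_nil,
      List.append_assoc, List.cons_append, List.nil_append]
    congr 2
    · -- the parity marker equals pvF at the odd position 1 + 2*N
      unfold pvF
      rw [pvOddPart_odd (1 + 2 * N) (by omega)]
      split_ifs with h1 h2 h2
      · rfl
      · exfalso; simp only [beq_iff_eq] at h1 h2; omega
      · exfalso; simp only [beq_iff_eq] at h1 h2; omega
      · rfl
    · -- the copied previous element equals pvF at the even position
      unfold pvF
      rw [show 1 + (2 * N + 1) = 2 * (1 + N) by ring, pvOddPart_two_mul]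

theorem pvStepA_pvFm (m : Nat) (hm : 1 ≤ m) : pvStepA (pvFm m) = pvFm (m + 1) := by
  unfold pvStepA pvFm
  rw [pvInterleave]
  have hlt : 1 ≤ 2 ^ m := Nat.one_le_two_pow
  have h1 : 2 ^ (m + 1) - 1 = 2 * (2 ^ m - 1) + 1 := by
    have : 2 ^ (m + 1) = 2 * 2 ^ m := by ring
    omega
  rw [h1, List.range'_concat, List.map_append]
  congr 1
  have hodd : pvOddPart (1 + 2 * (2 ^ m - 1)) = 1 + 2 * (2 ^ m - 1) :=
    pvOddPart_odd _ (by omega)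
  have h4 : (1 + 2 * (2 ^ m - 1)) % 4 = 3 := by
    have h2 : 2 ^ m = 2 * 2 ^ (m - 1) := by
      conv_lhs => rw [show m = 1 + (m - 1) by omega]
      ring
    omega
  simp [pvF, hodd, h4]

theorem pvFm_three : pvFm 3 = [0, 0, 1, 0, 0, 1, 1] := by
  have p1 : pvOddPart 1 = 1 := pvOddPart_odd 1 rfl
  have p3 : pvOddPart 3 = 3 := pvOddPart_odd 3 rfl
  have p5 : pvOddPart 5 = 5 := pvOddPart_odd 5 rfl
  have p7 : pvOddPart 7 = 7 := pvOddPart_odd 7 rfl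
  have p2 : pvOddPart 2 = 1 := by rw [show (2 : Nat) = 2 * 1 from rfl, pvOddPart_two_mul, p1]
  have p6 : pvOddPart 6 = 3 := by rw [show (6 : Nat) = 2 * 3 from rfl, pvOddPart_two_mul, p3]
  have p4 : pvOddPart 4 = 1 := by
    rw [show (4 : Nat) = 2 * 2 from rfl, pvOddPart_two_mul, p2]
  simp [pvFm, pvF, List.range', p1, p2, p3, p4, p5, p6, p7]

theorem pvFold_inv (t : Nat) :
    (((PySem.List.pyRange 4 (4 + (t : Int)) 1).foldl
      (fun dp i => dp ++ [pvStepA ((PySem.List.pyGet? dp (i - 1)).getD [])])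
      [[], [0], [0, 0, 1], [0, 0, 1, 0, 0, 1, 1]]).length = 4 + t) ∧
    ((PySem.List.pyRange 4 (4 + (t : Int)) 1).foldl
      (fun dp i => dp ++ [pvStepA ((PySem.List.pyGet? dp (i - 1)).getD [])])
      [[], [0], [0, 0, 1], [0, 0, 1, 0, 0, 1, 1]]).getLast? = some (pvFm (3 + t)) := by
  induction t with
  | zero =>
    rw [PySem.List.pyRange_one_eq_nil (by norm_num)]
    exact ⟨rfl, by simp only [List.foldl_nil]; rw [pvFm_three]; rfl⟩
  | succ t ih =>
    obtain ⟨ihl, ihg⟩ := ih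
    have hsplit : PySem.List.pyRange 4 (4 + ((t : Int) + 1)) 1
        = PySem.List.pyRange 4 (4 + (t : Int)) 1 ++ [4 + (t : Int)] := by
      rw [show (4 : Int) + ((t : Int) + 1) = (4 + (t : Int)) + 1 by ring]
      exact PySem.List.pyRange_one_succ_right (by omega)
    push_cast
    rw [hsplit, List.foldl_append, List.foldl_cons, List.foldl_nil]
    set d := (PySem.List.pyRange 4 (4 + (t : Int)) 1).foldl
      (fun dp i => dp ++ [pvStepA ((PySem.List.pyGet? dp (i - 1)).getD [])])
      [[], [0], [0, 0, 1], [0, 0, 1, 0, 0, 1, 1]] with hd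
    have h35 : d.length - 1 = 3 + t := by omega
    rw [List.getLast?_eq_getElem?, h35] at ihg
    have hidx : (4 : Int) + (t : Int) - 1 = ((3 + t : Nat) : Int) := by push_cast; ring
    have hget : PySem.List.pyGet? d (4 + (t : Int) - 1) = some (pvFm (3 + t)) := by
      rw [hidx, PySem.List.pyGet?_natCast]
      exact ihg
    rw [hget]
    simp only [Option.getD_some]
    rw [pvStepA_pvFm (3 + t) (by omega)]
    refine ⟨?_, ?_⟩
    · rw [List.length_append, ihl]; simp; omega
    · rw [List.getLast?_concat, Nat.add_assoc]

theorem pvAlt_eq (N : Nat) :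
    (PySem.List.pyRange 1 ((2 : Int) ^ N) 1).map
      (fun k => if pvOddPart k.toNat % 4 == 1 then (0 : Int) else 1) = pvFm N := by
  rw [PySem.List.pyRange_one]
  have hcast : ((2 : Int) ^ N - 1).toNat = 2 ^ N - 1 := by
    have : ((2 : Int) ^ N) = ((2 ^ N : Nat) : Int) := by push_cast; ring
    omega
  rw [hcast]
  unfold pvFm
  rw [List.range'_eq_map_range, List.map_map, List.map_map]
  apply List.map_congr_left
  intro k _
  simp only [Function.comp]
  rw [show ((1 : Int) + (k : Int)).toNat = 1 + k by omega]
  rfl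

-- ===== VERDICT (by name: the statement is the Claim_ definition above) =====
theorem solution_spec : Claim_equal_solution := by
  intro n _ hpre
  unfold Spec_solution solution solution_alt
  by_cases h : n ≤ 3
  · simp only [if_pos h]
  · simp only [if_neg h]
    have hn4 : 4 ≤ n := by omega
    obtain ⟨t, ht⟩ : ∃ t : Nat, n + 1 = 4 + (t : Int) := ⟨(n - 3).toNat, by omega⟩
    rw [ht]
    obtain ⟨hl, hg⟩ := pvFold_inv t
    rw [PySem.List.pyGet?_neg_one, hg]
    simp only [Option.getD_some]
    rw [pvAlt_eq]
    congr 1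
    omega
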